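-- pv_equiv track=rewrite | github.com/uno2os3es/bin_feb | rmc.py | remove_docstrings_simple
-- ===== SOURCE A (Python) =====
-- def remove_docstrings_simple(content: str) -> tuple[str, int]:
--     removed_count = 0
--     lines = content.split("\n")
--     result_lines = []
--     i = 0
--
--     while i < len(lines):
--         line = lines[i]
--
--         if '"""' in line or "'''" in line:
--             delimiter = '"""' if '"""' in line else "'''"
--             count = line.count(delimiter)
--
--             if count >= 2:
--                 first = line.find(delimiter)
--                 second = line.find(delimiter, first + 3)
--                 before = line[:first].rstrip()
--
--                 if before.endswith(":") or before.strip() == "":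
--                     result_lines.append(line[:first] + line[second + 3 :])
--                     removed_count += 1
--                     i += 1
--                     continue
--
--             before = line[: line.find(delimiter)].rstrip()
--
--             if before.endswith(":") or before.strip() == "" or "=" not in before:
--                 removed_count += 1
--                 if before:
--                     result_lines.append(before)
--
--                 j = i + 1
--                 while j < len(lines):
--                     if delimiter in lines[j]:
--                         after = lines[j][lines[j].find(delimiter) + 3 :].strip()
--                         if after:
--                             result_lines.append(after)
--                         i = j + 1
--                         break
--                     j += 1
--                 else:
--                     i = j
--             else:
--                 result_lines.append(line)
--                 i += 1
--         else:
--             result_lines.append(line)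
--             i += 1
--
--     return "\n".join(result_lines), removed_count
-- ===== SOURCE B (Python) =====
-- def remove_docstrings_simple(content: str) -> tuple[str, int]:
--     out = []
--     removed = 0
--     skipping = False
--     delim = ""
--     for line in content.split("\n"):
--         if skipping:
--             if delim in line:
--                 after = line[line.find(delim) + 3:].strip()
--                 if after:
--                     out.append(after)
--                 skipping = False
--         elif '"""' in line or "'''" in line:
--             delim = '"""' if '"""' in line else "'''"
--             first = line.find(delim)
--             before = line[:first].rstrip()
--             trigger = before.endswith(":") or before.strip() == ""
--             if line.count(delim) >= 2 and trigger:
--                 second = line.find(delim, first + 3)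
--                 out.append(line[:first] + line[second + 3:])
--                 removed += 1
--             elif trigger or "=" not in before:
--                 removed += 1
--                 if before:
--                     out.append(before)
--                 skipping = True
--             else:
--                 out.append(line)
--         else:
--             out.append(line)
--     return "\n".join(out), removed
-- ===== Notes on version B (the rewrite author's own statement) =====
-- stated objective: simpler
-- what changed: Replaces A's index-driven while loop with a nested delimiter-scanning inner loop (and for/else fall-through) by a single flat pass over the lines carrying a skipping-state flag and the active delimiter.
import Mathlib
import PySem

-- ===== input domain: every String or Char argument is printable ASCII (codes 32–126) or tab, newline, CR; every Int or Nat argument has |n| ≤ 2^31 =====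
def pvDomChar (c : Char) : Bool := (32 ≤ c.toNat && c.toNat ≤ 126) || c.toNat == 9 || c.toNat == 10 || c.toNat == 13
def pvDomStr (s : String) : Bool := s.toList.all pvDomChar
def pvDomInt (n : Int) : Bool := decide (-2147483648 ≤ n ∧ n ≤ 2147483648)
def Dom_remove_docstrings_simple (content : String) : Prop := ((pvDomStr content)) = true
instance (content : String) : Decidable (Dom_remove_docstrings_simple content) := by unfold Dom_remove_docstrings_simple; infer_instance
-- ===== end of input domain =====

-- B replaces A's index-driven while loop with nested close-delimiter scan (for/else)
-- by a single flat pass over the lines carrying a skipping flag and the active delimiter (objective: simpler).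


-- ===== PORT A =====
-- inner `while j < len(lines)` loop: scan the remaining lines for the closing delimiter;
-- `some (after, rest')` = break with `after = lines[j][lines[j].find(delimiter)+3:].strip()` and `i = j + 1`,
-- `none` = the while/else fall-through (`i = j = len(lines)`)
def pvScanClose (delim : String) : List String → Option (String × List String)
  | [] => none
  | l :: ls =>
    if PySem.Str.isIn delim l then
      some (PySem.Str.strip (PySem.Str.slice l (some (PySem.Str.find l delim + 3)) none), ls)
    else pvScanClose delim ls

theorem pvScanClose_length {delim : String} : ∀ {ls : List String} {a : String} {rest : List String},
    pvScanClose delim ls = some (a, rest) → rest.length < ls.length := by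
  intro ls
  induction ls with
  | nil => intro a rest h; simp [pvScanClose] at h
  | cons l ls ih =>
    intro a rest h
    rw [pvScanClose] at h
    by_cases hc : PySem.Str.isIn delim l = true
    · rw [if_pos hc] at h
      injection h with h
      injection h with _ h
      simp [← h]
    · rw [if_neg hc] at h
      exact Nat.lt_succ_of_lt (ih h)

-- outer `while i < len(lines)` loop of A, as recursion on the remaining lines
-- (returns the collected result_lines and removed_count)
def pvLoopA : List String → List String × Int
  | [] => ([], 0)
  | line :: rest =>
    if PySem.Str.isIn "\"\"\"" line || PySem.Str.isIn "'''" line then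
      let delim := if PySem.Str.isIn "\"\"\"" line then "\"\"\"" else "'''"
      let first := PySem.Str.find line delim
      let before := PySem.Str.rstrip (PySem.Str.slice line none (some first))
      if 2 ≤ PySem.Str.count line delim ∧
          (PySem.Str.endswith before ":" || PySem.Str.strip before == "") = true then
        -- same-line open+close: splice the docstring out of the line and continue
        let second := PySem.Str.findFrom line delim (first + 3)
        let p := pvLoopA rest
        (PySem.Str.join "" [PySem.Str.slice line none (some first),
                            PySem.Str.slice line (some (second + 3)) none] :: p.1, p.2 + 1)
      else if (PySem.Str.endswith before ":" || PySem.Str.strip before == ""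
              || !(PySem.Str.isIn "=" before)) = true then
        match h : pvScanClose delim rest with
        | some (after, rest') =>
          let p := pvLoopA rest'
          ((if before = "" then [] else [before]) ++ (if after = "" then [] else [after]) ++ p.1,
           p.2 + 1)
        | none =>
          -- while/else: i = j = len(lines); the consumed lines are dropped
          ((if before = "" then [] else [before]), 1)
      else
        let p := pvLoopA rest
        (line :: p.1, p.2)
    else
      let p := pvLoopA rest
      (line :: p.1, p.2)
  termination_by ls => ls.length
  decreasing_by
    · simp
    · exact Nat.lt_succ_of_lt (pvScanClose_length h)
    · simp
    · simp

def remove_docstrings_simple (content : String) : String × Int :=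
  -- content.split("\n"): sep = "\n" ≠ "", so split? never returns none
  let lines := (PySem.Str.split? content "\n").getD []
  let p := pvLoopA lines
  (PySem.Str.join "\n" p.1, p.2)

-- ===== PORT B =====
-- one step of B's flat pass; state = (out, removed, skipping, delim)
def pvStepB : List String × Int × Bool × String → String → List String × Int × Bool × String
  | (out, removed, skipping, delim), line =>
    if skipping then
      if PySem.Str.isIn delim line then
        let after := PySem.Str.strip (PySem.Str.slice line (some (PySem.Str.find line delim + 3)) none)
        (out ++ (if after = "" then [] else [after]), removed, false, delim)
      else
        (out, removed, skipping, delim)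
    else if PySem.Str.isIn "\"\"\"" line || PySem.Str.isIn "'''" line then
      let delim := if PySem.Str.isIn "\"\"\"" line then "\"\"\"" else "'''"
      let first := PySem.Str.find line delim
      let before := PySem.Str.rstrip (PySem.Str.slice line none (some first))
      let trigger := PySem.Str.endswith before ":" || PySem.Str.strip before == ""
      if 2 ≤ PySem.Str.count line delim ∧ trigger = true then
        let second := PySem.Str.findFrom line delim (first + 3)
        (out ++ [PySem.Str.join "" [PySem.Str.slice line none (some first),
                                    PySem.Str.slice line (some (second + 3)) none]],
         removed + 1, false, delim)
      else if (trigger || !(PySem.Str.isIn "=" before)) = true then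
        (out ++ (if before = "" then [] else [before]), removed + 1, true, delim)
      else
        (out ++ [line], removed, false, delim)
    else
      (out ++ [line], removed, skipping, delim)

def remove_docstrings_simple_alt (content : String) : String × Int :=
  -- content.split("\n"): sep = "\n" ≠ "", so split? never returns none
  let lines := (PySem.Str.split? content "\n").getD []
  let st := List.foldl pvStepB ([], 0, false, "") lines
  (PySem.Str.join "\n" st.1, st.2.1)

-- ===== PRECONDITION & SPEC =====
def Spec_remove_docstrings_simple (content : String) (out : String × Int) : Prop := out = remove_docstrings_simple_alt content
instance (content : String) (out : String × Int) : Decidable (Spec_remove_docstrings_simple content out) := by unfold Spec_remove_docstrings_simple; infer_instance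

-- ===== CLAIM (what is proved, stated in full; the proofs are below) =====
def Claim_equal_remove_docstrings_simple : Prop := ∀ (content : String), Dom_remove_docstrings_simple content → Spec_remove_docstrings_simple content (remove_docstrings_simple content)

-- ===== LEMMAS AND PROOFS =====

-- B's fold in skipping mode consumes lines exactly as A's inner scan does
theorem pvFoldB_skip (delim : String) : ∀ (ls : List String) (out : List String) (rem : Int),
    List.foldl pvStepB (out, rem, true, delim) ls =
      match pvScanClose delim ls with
      | none => (out, rem, true, delim)
      | some (after, rest) =>
          List.foldl pvStepB (out ++ (if after = "" then [] else [after]), rem, false, delim) rest := by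
  intro ls
  induction ls with
  | nil => intro out rem; simp [pvScanClose]
  | cons l ls ih =>
    intro out rem
    rw [List.foldl_cons]
    simp only [pvStepB, pvScanClose]
    by_cases hc : PySem.Str.isIn delim l = true
    · rw [if_pos trivial, if_pos hc, if_pos hc]
    · rw [if_pos trivial, if_neg hc, if_neg hc]
      exact ih out rem

-- B's fold starting unskipped computes A's loop, shifted by the accumulated state
theorem pvFoldB_eq_loopA : ∀ (n : Nat) (ls : List String), ls.length ≤ n →
    ∀ (out : List String) (rem : Int) (d : String),
      (List.foldl pvStepB (out, rem, false, d) ls).1 = out ++ (pvLoopA ls).1 ∧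
      (List.foldl pvStepB (out, rem, false, d) ls).2.1 = rem + (pvLoopA ls).2 := by
  intro n
  induction n with
  | zero =>
    intro ls hls out rem d
    have : ls = [] := List.eq_nil_of_length_eq_zero (Nat.le_zero.mp hls)
    subst this
    simp [pvLoopA]
  | succ n ih =>
    intro ls hls out rem d
    match ls with
    | [] => simp [pvLoopA]
    | line :: rest =>
      have hrest : rest.length ≤ n := by
        have := hls; simp [List.length_cons] at this; omega
      rw [List.foldl_cons]
      simp only [pvStepB, pvLoopA]
      rw [if_neg (by simp)]
      by_cases h1 : (PySem.Str.isIn "\"\"\"" line || PySem.Str.isIn "'''" line) = true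
      · rw [if_pos h1, if_pos h1]
        by_cases h2 : 2 ≤ PySem.Str.count line
              (if PySem.Str.isIn "\"\"\"" line then "\"\"\"" else "'''") ∧
            ((PySem.Str.endswith (PySem.Str.rstrip (PySem.Str.slice line none
                (some (PySem.Str.find line (if PySem.Str.isIn "\"\"\"" line then "\"\"\"" else "'''"))))) ":"
             || PySem.Str.strip (PySem.Str.rstrip (PySem.Str.slice line none
                (some (PySem.Str.find line (if PySem.Str.isIn "\"\"\"" line then "\"\"\"" else "'''"))))) == "") = true)
        · rw [if_pos h2, if_pos h2]
          refine ⟨?_, ?_⟩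
          · rw [(ih rest hrest _ _ _).1]
            try simp
          · rw [(ih rest hrest _ _ _).2]
            try omega
        · rw [if_neg h2, if_neg h2]
          by_cases h3 : ((PySem.Str.endswith (PySem.Str.rstrip (PySem.Str.slice line none
                (some (PySem.Str.find line (if PySem.Str.isIn "\"\"\"" line then "\"\"\"" else "'''"))))) ":"
             || PySem.Str.strip (PySem.Str.rstrip (PySem.Str.slice line none
                (some (PySem.Str.find line (if PySem.Str.isIn "\"\"\"" line then "\"\"\"" else "'''"))))) == ""
             || !(PySem.Str.isIn "=" (PySem.Str.rstrip (PySem.Str.slice line none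
                (some (PySem.Str.find line (if PySem.Str.isIn "\"\"\"" line then "\"\"\"" else "'''"))))))) = true)
          · rw [if_pos h3, if_pos h3]
            rw [pvFoldB_skip]
            cases hscan : pvScanClose (if PySem.Str.isIn "\"\"\"" line then "\"\"\"" else "'''") rest with
            | none =>
              exact ⟨by simp, by simp⟩
            | some pr =>
              obtain ⟨after, rest'⟩ := pr
              have hlen : rest'.length ≤ n := Nat.le_trans (Nat.le_of_lt (pvScanClose_length hscan)) hrest
              refine ⟨?_, ?_⟩
              · rw [(ih rest' hlen _ _ _).1]
                try simp
              · rw [(ih rest' hlen _ _ _).2]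
                simp
                omega
          · rw [if_neg h3, if_neg h3]
            refine ⟨?_, ?_⟩
            · rw [(ih rest hrest _ _ _).1]
              try simp
            · rw [(ih rest hrest _ _ _).2]
              try omega
      · rw [if_neg h1, if_neg h1]
        refine ⟨?_, ?_⟩
        · rw [(ih rest hrest _ _ _).1]
          try simp
        · rw [(ih rest hrest _ _ _).2]
          try omega

-- ===== VERDICT (by name: the statement is the Claim_ definition above) =====
theorem remove_docstrings_simple_spec : Claim_equal_remove_docstrings_simple := by
  intro content _
  unfold Spec_remove_docstrings_simple remove_docstrings_simple remove_docstrings_simple_alt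
  obtain ⟨h1, h2⟩ := pvFoldB_eq_loopA ((PySem.Str.split? content "\n").getD []).length
    ((PySem.Str.split? content "\n").getD []) (le_refl _) [] 0 ""
  simp only []
  rw [h1, h2]
  simp
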